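-- pv_equiv track=rewrite | github.com/heybake/ev-navigator-deuces | dw_strategy_definitions.py | holds_3_of_a_kind
-- ===== SOURCE A (Python) =====
-- def _get_cards(indices, original_hand):
--     return [original_hand[i] for i in indices]
--
-- def holds_3_of_a_kind(ranks, suits, hand):
--     non_2 = [r for r in ranks if r != 2]
--     counts = {x: non_2.count(x) for x in non_2}
--     deuces = [i for i, r in enumerate(ranks) if r == 2]
--     for rank, count in counts.items():
--         if count + len(deuces) == 3:
--             rank_indices = [i for i, r in enumerate(ranks) if r == rank]
--             return _get_cards(deuces + rank_indices, hand)
--     return None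
-- ===== SOURCE B (Python) =====
-- def holds_3_of_a_kind(ranks, suits, hand):
--     # Sort card positions by rank, split the sorted list into contiguous runs
--     # (one per rank), collect the runs that complete 3-of-a-kind with the
--     # deuces, then a final scan of ranks picks the first-appearing candidate.
--     pairs = sorted(enumerate(ranks), key=lambda p: p[1])
--     deuces = [i for i, r in pairs if r == 2]
--     cands = []
--     rest = pairs
--     while rest:
--         r = rest[0][1]
--         run = [i for i, x in rest if x == r]
--         rest = rest[len(run):]
--         if r != 2 and len(run) + len(deuces) == 3:
--             cands.append((r, run))
--     for r in ranks:
--         for cr, run in cands: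
--             if r == cr:
--                 return [hand[i] for i in deuces + run]
--     return None
-- ===== Notes on version B (the rewrite author's own statement) =====
-- stated objective: alternative
-- what changed: Replaces A's count-dict-and-rescan with a sort-based algorithm: positions are sorted by rank, the sorted list is split into contiguous runs (no dict and no counting), candidate runs completing 3 with the deuces are collected, and one final scan of the original ranks recovers A's first-appearance tie-break.
-- outside the precondition, e.g. on holds_3_of_a_kind([3, 3, 3, 5], [], [10, 11, 12]): A returns [10, 11, 12], B returns [10, 11, 12]
import Mathlib
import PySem

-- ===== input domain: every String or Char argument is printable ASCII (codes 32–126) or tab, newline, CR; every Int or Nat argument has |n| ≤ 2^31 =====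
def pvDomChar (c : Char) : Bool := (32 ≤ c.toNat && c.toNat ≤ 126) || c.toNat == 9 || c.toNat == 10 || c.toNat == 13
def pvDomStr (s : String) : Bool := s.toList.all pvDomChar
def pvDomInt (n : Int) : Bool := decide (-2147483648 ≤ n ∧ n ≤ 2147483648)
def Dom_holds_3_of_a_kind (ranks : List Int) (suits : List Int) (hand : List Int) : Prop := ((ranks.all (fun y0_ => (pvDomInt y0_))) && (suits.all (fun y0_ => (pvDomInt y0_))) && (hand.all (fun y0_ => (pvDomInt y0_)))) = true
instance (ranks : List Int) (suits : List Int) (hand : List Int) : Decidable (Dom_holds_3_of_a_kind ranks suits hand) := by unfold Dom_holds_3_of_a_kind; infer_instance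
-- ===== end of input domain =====

-- B replaces A's count-dict-and-items-scan by a sort-based algorithm (sort positions by rank,
-- split into runs, pick the first-appearing candidate rank by a final scan); equivalence proved on Pre_.

-- ===== PORT A =====
-- _get_cards: original_hand[i]; pyGet? is exact, .getD 0 is only reached outside Pre_ (Python raises IndexError there)
def pvGetCards (indices : List Int) (original_hand : List Int) : List Int :=
  indices.map (fun i => (PySem.List.pyGet? original_hand i).getD 0)

def holds_3_of_a_kind (ranks : List Int) (suits : List Int) (hand : List Int) : Option (List Int) :=
  let non_2 := ranks.filter (fun r => r != 2)
  let counts : PySem.Dict Int Int :=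
    non_2.foldl (fun d x => d.insert x ((PySem.List.count non_2 x : Int))) PySem.Dict.empty
  let deuces := ((PySem.List.enumerate ranks).filter (fun p => p.2 == 2)).map (fun p => p.1)
  -- 'for rank, count in counts.items(): if …: return …' = first item passing the test
  match counts.items.find? (fun p => p.2 + (deuces.length : Int) == 3) with
  | some (rank, _) =>
      let rank_indices := ((PySem.List.enumerate ranks).filter (fun p => p.2 == rank)).map (fun p => p.1)
      some (pvGetCards (deuces ++ rank_indices) hand)
  | none => none

-- ===== PORT B =====
-- the 'while rest:' loop: take the run of the (minimal) head rank, drop it, collect candidates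
def pvRunsLoop (dl : Int) (acc : List (Int × List Int)) : List (Int × Int) → List (Int × List Int)
  | [] => acc
  | p :: rest0 =>
      pvRunsLoop dl
        (if p.2 != 2 && (((((p :: rest0).filter (fun q => q.2 == p.2)).map (fun q => q.1)).length : Int) + dl == 3)
         then acc ++ [(p.2, ((p :: rest0).filter (fun q => q.2 == p.2)).map (fun q => q.1))] else acc)
        ((p :: rest0).drop (((p :: rest0).filter (fun q => q.2 == p.2)).map (fun q => q.1)).length)
  termination_by rest => rest.length
  decreasing_by
    simp only [List.length_drop, List.length_map]
    have h1 : 1 ≤ ((p :: rest0).filter (fun q => q.2 == p.2)).length := by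
      simp
    have h2 := List.length_filter_le (fun q => q.2 == p.2) (p :: rest0)
    simp only [List.length_cons] at *
    omega

-- the final 'for r in ranks: for cr, run in cands: if r == cr: return …' scan
def pvPick (hand : List Int) (deuces : List Int) (cands : List (Int × List Int)) : List Int → Option (List Int)
  | [] => none
  | r :: rs =>
      match cands.find? (fun c => r == c.1) with
      | some c => some ((deuces ++ c.2).map (fun i => (PySem.List.pyGet? hand i).getD 0))
      | none => pvPick hand deuces cands rs

def holds_3_of_a_kind_alt (ranks : List Int) (suits : List Int) (hand : List Int) : Option (List Int) :=
  let pairs := PySem.List.sorted (PySem.List.enumerate ranks) (fun p => p.2)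
  let deuces := (pairs.filter (fun p => p.2 == 2)).map (fun p => p.1)
  let cands := pvRunsLoop (deuces.length : Int) [] pairs
  pvPick hand deuces cands ranks

-- ===== PRECONDITION & SPEC =====
-- Pre_ excludes malformed (non-parallel) inputs where hand is shorter than ranks AND some rank completes
-- 3-of-a-kind: only there can A index hand out of range and raise IndexError; on the excluded inputs
-- where the matched indices still fit the short hand, A and B return the same value anyway.
def Pre_holds_3_of_a_kind (ranks : List Int) (suits : List Int) (hand : List Int) : Prop :=
  ranks.length ≤ hand.length ∨ ∀ r ∈ ranks, r ≠ 2 → ranks.count r + ranks.count 2 ≠ 3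
instance (ranks : List Int) (suits : List Int) (hand : List Int) : Decidable (Pre_holds_3_of_a_kind ranks suits hand) := by unfold Pre_holds_3_of_a_kind; infer_instance
def pvWitness_holds_3_of_a_kind : List Int × List Int × List Int :=
  ([3, 3, 3, 5, 6], [0, 1, 2, 3, 1], [33, 33, 33, 55, 66])
def Spec_holds_3_of_a_kind (ranks : List Int) (suits : List Int) (hand : List Int) (out : Option (List Int)) : Prop := out = holds_3_of_a_kind_alt ranks suits hand
instance (ranks : List Int) (suits : List Int) (hand : List Int) (out : Option (List Int)) : Decidable (Spec_holds_3_of_a_kind ranks suits hand out) := by unfold Spec_holds_3_of_a_kind; infer_instance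

-- ===== CLAIM (what is proved, stated in full; the proofs are below) =====
def Claim_equal_holds_3_of_a_kind : Prop := ∀ (ranks : List Int) (suits : List Int) (hand : List Int), Dom_holds_3_of_a_kind ranks suits hand → Pre_holds_3_of_a_kind ranks suits hand → Spec_holds_3_of_a_kind ranks suits hand (holds_3_of_a_kind ranks suits hand)

-- ===== LEMMAS AND PROOFS =====

-- proof-only shorthands: the (ascending) indices of rank r, and the 3-of-a-kind test
def pvIdxs (ranks : List Int) (r : Int) : List Int :=
  ((PySem.List.enumerate ranks).filter (fun q => q.2 == r)).map (fun q => q.1)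
def pvCond (ranks : List Int) (dl : Int) (r : Int) : Bool :=
  ((pvIdxs ranks r).length : Int) + dl == 3

-- find? only depends on the predicate's values on the list
theorem pv_find?_congr_mem {α : Type} (l : List α) (p q : α → Bool)
    (h : ∀ a ∈ l, p a = q a) : l.find? p = l.find? q := by
  induction l with
  | nil => rfl
  | cons a l ih =>
    simp only [List.find?_cons]
    rw [h a (by simp)]
    cases hq : q a with
    | true => rfl
    | false => exact ih (fun b hb => h b (by simp [hb]))

-- a fold inserting a value that depends only on the key
theorem pv_getD_foldl_insert_const (l : List Int) (c : Int → Int) (d : PySem.Dict Int Int) (v : Int) :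
    (l.foldl (fun d x => d.insert x (c x)) d).getD v 0
      = if v ∈ l then c v else d.getD v 0 := by
  induction l generalizing d with
  | nil => simp
  | cons a l ih =>
    simp only [List.foldl_cons, ih, PySem.Dict.getD_insert, List.mem_cons]
    by_cases hv : v ∈ l
    · simp [hv]
    · by_cases ha : v = a <;> simp [hv, ha]

-- projecting the second component through filter-of-enumerate
theorem pv_filter_enumerate_snd (ranks : List Int) (pred : Int → Bool) :
    ((PySem.List.enumerate ranks 0).filter (fun p => pred p.2)).map (fun p => p.2)
      = ranks.filter pred := by
  conv_rhs => rw [← PySem.List.map_snd_enumerate ranks 0]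
  rw [List.filter_map]
  rfl

-- the length of a rank's index group is its count among the non-2 ranks
theorem pv_count_aux (ranks : List Int) (k : Int) (hk : k ≠ 2) :
    (((pvIdxs ranks k).length : Nat) : Int)
      = ((PySem.List.count (ranks.filter (fun r => r != 2)) k : Nat) : Int) := by
  have h1 : (pvIdxs ranks k).length
      = (((PySem.List.enumerate ranks 0).filter (fun p => p.2 == k)).map (fun p => p.2)).length := by
    simp [pvIdxs]
  rw [h1, pv_filter_enumerate_snd ranks (fun r => r == k)]
  have h2 : PySem.List.count (ranks.filter (fun r => r != 2)) k
      = (ranks.filter (fun r => r == k)).length := by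
    rw [PySem.List.count_eq]
    rw [List.count_filter (by simp [hk])]
    rw [List.count_eq_countP, List.countP_eq_length_filter]
  rw [h2]

-- A's counts dict: keys are the distinct non-2 ranks in first appearance order, values the counts
theorem pv_counts_items (ranks : List Int) :
    ((ranks.filter (fun r => r != 2)).foldl
        (fun d x => d.insert x ((PySem.List.count (ranks.filter (fun r => r != 2)) x : Nat) : Int))
        PySem.Dict.empty).items
      = (PySem.Set.ofList (ranks.filter (fun r => r != 2))).map
          (fun k => (k, ((PySem.List.count (ranks.filter (fun r => r != 2)) k : Nat) : Int))) := by
  have hnd : ((ranks.filter (fun r => r != 2)).foldl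
        (fun d x => d.insert x ((PySem.List.count (ranks.filter (fun r => r != 2)) x : Nat) : Int))
        PySem.Dict.empty).keys.Nodup :=
    PySem.Dict.nodup_keys_foldl_insert _ _ _ PySem.Dict.nodup_keys_empty
  have hkeys : ((ranks.filter (fun r => r != 2)).foldl
        (fun d x => d.insert x ((PySem.List.count (ranks.filter (fun r => r != 2)) x : Nat) : Int))
        PySem.Dict.empty).keys = PySem.Set.ofList (ranks.filter (fun r => r != 2)) := by
    rw [PySem.Dict.keys_foldl_insert, PySem.Dict.keys_empty, PySem.Set.ofList_eq_foldl]
    rfl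
  rw [PySem.Dict.items_eq_map_keys _ hnd 0, hkeys]
  apply List.map_congr_left
  intro k hk
  have hk' : k ∈ ranks.filter (fun r => r != 2) := (PySem.Set.mem_ofList _ _).mp hk
  rw [pv_getD_foldl_insert_const, if_pos hk']

-- ---- dedup: find? over set(xs) = find? over xs ----
theorem pv_find?_foldl_add {α : Type} [BEq α] [LawfulBEq α] (p : α → Bool) (l : List α) (acc : List α) :
    (l.foldl PySem.Set.add acc).find? p = (acc.find? p).or (l.find? p) := by
  induction l generalizing acc with
  | nil => simp
  | cons x l ih =>
    rw [List.foldl_cons, ih, List.find?_cons]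
    by_cases hx : x ∈ acc
    · have hadd : PySem.Set.add acc x = acc := by
        simp [PySem.Set.add, hx]
      rw [hadd]
      cases hpx : p x with
      | false => rfl
      | true =>
        have hs : (acc.find? p).isSome := List.find?_isSome.mpr ⟨x, hx, hpx⟩
        cases hfa : acc.find? p with
        | none => rw [hfa] at hs; simp at hs
        | some s => simp
    · have hadd : PySem.Set.add acc x = acc ++ [x] := by
        simp [PySem.Set.add, hx]
      rw [hadd, List.find?_append, Option.or_assoc]
      congr 1
      cases hpx : p x with
      | false => simp [List.find?, hpx]
      | true => simp [List.find?, hpx]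

theorem pv_find?_ofList {α : Type} [BEq α] [LawfulBEq α] (p : α → Bool) (l : List α) :
    (PySem.Set.ofList l).find? p = l.find? p := by
  rw [PySem.Set.ofList_eq_foldl, pv_find?_foldl_add]
  simp

-- ---- stability of PySem's (insertion) sort, as a filter equation ----
theorem pv_insertBy_pairwise (x : Int × Int) (acc : List (Int × Int))
    (h : acc.Pairwise (fun a b => a.2 ≤ b.2)) :
    (PySem.List.insertBy (fun a b => decide (a.2 < b.2)) x acc).Pairwise (fun a b => a.2 ≤ b.2) := by
  induction acc with
  | nil => simp [PySem.List.insertBy]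
  | cons y ys ih =>
    rw [List.pairwise_cons] at h
    simp only [PySem.List.insertBy]
    by_cases hb : x.2 < y.2
    · rw [if_pos (by simpa using hb)]
      refine List.pairwise_cons.mpr ⟨?_, List.pairwise_cons.mpr h⟩
      intro b hbmem
      rcases List.mem_cons.mp hbmem with hby | hbys
      · exact le_of_lt (hby ▸ hb)
      · exact le_of_lt (lt_of_lt_of_le hb (h.1 b hbys))
    · rw [if_neg (by simpa using hb)]
      refine List.pairwise_cons.mpr ⟨?_, ih h.2⟩
      intro b hbmem
      rcases (PySem.List.mem_insertBy _ _ _ _).mp hbmem with hbx | hbys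
      · exact hbx ▸ le_of_not_gt hb
      · exact h.1 b hbys

theorem pv_insertBy_filter (r : Int) (x : Int × Int) (acc : List (Int × Int))
    (h : acc.Pairwise (fun a b => a.2 ≤ b.2)) :
    (PySem.List.insertBy (fun a b => decide (a.2 < b.2)) x acc).filter (fun p => p.2 == r)
      = acc.filter (fun p => p.2 == r) ++ (if x.2 == r then [x] else []) := by
  induction acc with
  | nil =>
    simp only [PySem.List.insertBy, List.filter, List.nil_append]
    by_cases hxr : x.2 = r
    · have hb : (x.2 == r) = true := by simp [hxr]
      rw [hb]
      simp
    · have hb : (x.2 == r) = false := by simp [hxr]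
      rw [hb]
      simp
  | cons y ys ih =>
    rw [List.pairwise_cons] at h
    simp only [PySem.List.insertBy]
    by_cases hb : x.2 < y.2
    · rw [if_pos (by simpa using hb)]
      by_cases hxr : x.2 = r
      · -- every element of y :: ys has key ≥ y.2 > r, so its r-filter is empty
        have hnil : (y :: ys).filter (fun p => p.2 == r) = [] := by
          rw [List.filter_eq_nil_iff]
          intro a ha
          rcases List.mem_cons.mp ha with hay | hays
          · subst hay; simp; omega
          · have := h.1 a hays; simp; omega
        rw [List.filter_cons_of_pos (by simp [hxr]), hnil]
        simp [hxr]
      · rw [List.filter_cons_of_neg (by simp [hxr])]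
        simp [hxr]
    · rw [if_neg (by simpa using hb)]
      by_cases hyr : y.2 = r
      · rw [List.filter_cons_of_pos (by simp [hyr]), List.filter_cons_of_pos (by simp [hyr]),
            ih h.2, List.cons_append]
      · rw [List.filter_cons_of_neg (by simp [hyr]), List.filter_cons_of_neg (by simp [hyr]),
            ih h.2]

theorem pv_foldl_insertBy_filter (r : Int) (xs : List (Int × Int)) : ∀ (acc : List (Int × Int)),
    acc.Pairwise (fun a b => a.2 ≤ b.2) →
    (xs.foldl (fun acc x => PySem.List.insertBy (fun a b => decide (a.2 < b.2)) x acc) acc).filter (fun p => p.2 == r)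
      = acc.filter (fun p => p.2 == r) ++ xs.filter (fun p => p.2 == r) := by
  induction xs with
  | nil => simp
  | cons x xs ih =>
    intro acc hacc
    rw [List.foldl_cons, ih _ (pv_insertBy_pairwise x acc hacc), pv_insertBy_filter r x acc hacc]
    by_cases hxr : x.2 = r
    · rw [List.filter_cons_of_pos (by simp [hxr])]
      simp [hxr]
    · rw [List.filter_cons_of_neg (by simp [hxr])]
      simp [hxr]

theorem pv_sorted_filter (xs : List (Int × Int)) (r : Int) :
    (PySem.List.sorted xs (fun p => p.2)).filter (fun p => p.2 == r) = xs.filter (fun p => p.2 == r) := by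
  rw [PySem.List.sorted_eq_foldl_insertBy]
  simpa using pv_foldl_insertBy_filter r xs [] (by simp)

-- ---- runs of a key-sorted list ----
theorem pv_filter_eq_takeWhile (k : Int) : ∀ (l : List (Int × Int)),
    l.Pairwise (fun a b => a.2 ≤ b.2) → (∀ q ∈ l, k ≤ q.2) →
    l.filter (fun q => q.2 == k) = l.takeWhile (fun q => q.2 == k) := by
  intro l
  induction l with
  | nil => intro _ _; rfl
  | cons y ys ih =>
    intro hp hmin
    rw [List.pairwise_cons] at hp
    by_cases hyk : y.2 = k
    · rw [List.filter_cons_of_pos (by simp [hyk]), List.takeWhile_cons_of_pos (by simp [hyk]),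
          ih hp.2 (fun q hq => by rw [← hyk]; exact hp.1 q hq)]
    · have hlt : k < y.2 := lt_of_le_of_ne (hmin y (by simp)) (Ne.symm hyk)
      rw [List.filter_cons_of_neg (by simp [hyk]), List.takeWhile_cons_of_neg (by simp [hyk])]
      rw [List.filter_eq_nil_iff]
      intro a ha
      have := hp.1 a ha
      simp
      omega

theorem pv_dropWhile_eq_filter_ne (k : Int) : ∀ (l : List (Int × Int)),
    l.Pairwise (fun a b => a.2 ≤ b.2) → (∀ q ∈ l, k ≤ q.2) →
    l.dropWhile (fun q => q.2 == k) = l.filter (fun q => q.2 != k) := by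
  intro l
  induction l with
  | nil => intro _ _; rfl
  | cons y ys ih =>
    intro hp hmin
    rw [List.pairwise_cons] at hp
    by_cases hyk : y.2 = k
    · rw [List.dropWhile_cons_of_pos (by simp [hyk]), List.filter_cons_of_neg (by simp [hyk]),
          ih hp.2 (fun q hq => by rw [← hyk]; exact hp.1 q hq)]
    · have hlt : k < y.2 := lt_of_le_of_ne (hmin y (by simp)) (Ne.symm hyk)
      rw [List.dropWhile_cons_of_neg (by simp [hyk]), List.filter_cons_of_pos (by simp [hyk])]
      have hself : List.filter (fun q => q.2 != k) ys = ys := by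
        rw [List.filter_eq_self]
        intro a ha
        have := hp.1 a ha
        simp
        omega
      rw [hself]

theorem pv_drop_takeWhile {α : Type} (q : α → Bool) (l : List α) :
    l.drop (l.takeWhile q).length = l.dropWhile q := by
  have h := List.takeWhile_append_dropWhile (p := q) (l := l)
  have h2 : l.drop (l.takeWhile q).length
      = (l.takeWhile q ++ l.dropWhile q).drop (l.takeWhile q).length := by rw [h]
  rw [h2, List.drop_left]

-- ---- the run loop: what ends up in cands ----
theorem pv_loop_spec (dl : Int) : ∀ (rest : List (Int × Int)) (acc : List (Int × List Int)),
    rest.Pairwise (fun a b => a.2 ≤ b.2) →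
    (∀ e ∈ pvRunsLoop dl acc rest, e ∈ acc ∨
       (e.1 ≠ 2 ∧ e.1 ∈ rest.map (fun q => q.2)
         ∧ e.2 = (rest.filter (fun q => q.2 == e.1)).map (fun q => q.1)
         ∧ (((e.2.length : Int) + dl == 3) = true)))
    ∧ (∀ r : Int, r ≠ 2 → r ∈ rest.map (fun q => q.2) →
         (((((rest.filter (fun q => q.2 == r)).length : Nat) : Int) + dl == 3) = true) →
         ∃ e ∈ pvRunsLoop dl acc rest, e.1 = r)
    ∧ (∀ e ∈ acc, e ∈ pvRunsLoop dl acc rest) := by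
  intro rest acc
  induction acc, rest using pvRunsLoop.induct dl with
  | case1 acc =>
    intro _
    refine ⟨?_, ?_, ?_⟩
    · intro e he
      rw [pvRunsLoop] at he
      exact Or.inl he
    · intro r _ hr _
      simp at hr
    · intro e he
      rw [pvRunsLoop]
      exact he
  | case2 acc p rest0 ih =>
    intro h
    have hmin : ∀ q ∈ p :: rest0, p.2 ≤ q.2 := by
      intro q hq
      rcases List.mem_cons.mp hq with hq | hq
      · exact le_of_eq (by rw [hq])
      · exact (List.pairwise_cons.mp h).1 q hq
    have hTW : (p :: rest0).filter (fun q => q.2 == p.2) = (p :: rest0).takeWhile (fun q => q.2 == p.2) :=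
      pv_filter_eq_takeWhile p.2 (p :: rest0) h hmin
    have hdrop : (p :: rest0).drop (((p :: rest0).filter (fun q => q.2 == p.2)).map (fun q => q.1)).length
        = (p :: rest0).filter (fun q => q.2 != p.2) := by
      rw [List.length_map, hTW, pv_drop_takeWhile, pv_dropWhile_eq_filter_ne p.2 (p :: rest0) h hmin]
    have hpair' : ((p :: rest0).filter (fun q => q.2 != p.2)).Pairwise (fun a b => a.2 ≤ b.2) :=
      List.Pairwise.sublist (List.filter_sublist) h
    have hfilter' : ∀ k : Int, k ≠ p.2 →
        ((p :: rest0).filter (fun q => q.2 != p.2)).filter (fun q => q.2 == k)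
          = (p :: rest0).filter (fun q => q.2 == k) := by
      intro k hk
      rw [List.filter_filter]
      apply List.filter_congr
      intro q _
      by_cases hq : q.2 = k
      · simp [hq, hk]
      · simp [hq]
    have hmem' : ∀ r : Int, r ∈ ((p :: rest0).filter (fun q => q.2 != p.2)).map (fun q => q.2)
        ↔ (r ∈ (p :: rest0).map (fun q => q.2) ∧ r ≠ p.2) := by
      intro r
      constructor
      · intro hr
        obtain ⟨q, hq, hq2⟩ := List.mem_map.mp hr
        obtain ⟨hqL, hqne⟩ := List.mem_filter.mp hq
        exact ⟨List.mem_map.mpr ⟨q, hqL, hq2⟩, by subst hq2; simpa using hqne⟩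
      · intro ⟨hr, hrne⟩
        obtain ⟨q, hq, hq2⟩ := List.mem_map.mp hr
        exact List.mem_map.mpr ⟨q, List.mem_filter.mpr ⟨hq, by subst hq2; simpa using hrne⟩, hq2⟩
    rw [pvRunsLoop, hdrop]
    rw [hdrop] at ih
    have ihc := ih hpair'
    by_cases hcnd : (p.2 != 2 && (((((p :: rest0).filter (fun q => q.2 == p.2)).map (fun q => q.1)).length : Int) + dl == 3)) = true
    · -- condition true: acc' = acc ++ [(p.2, run)]
      rw [if_pos hcnd]
      rw [dif_pos hcnd] at ihc
      obtain ⟨hne2, hlen3⟩ := by simpa using hcnd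
      refine ⟨?_, ?_, ?_⟩
      · intro e he
        rcases (ihc.1 e he) with hacc' | hnew
        · rcases List.mem_append.mp hacc' with hacc | hsing
          · exact Or.inl hacc
          · have he' : e = (p.2, ((p :: rest0).filter (fun q => q.2 == p.2)).map (fun q => q.1)) := by simpa using hsing
            refine Or.inr ⟨by rw [he']; exact hne2, ?_, ?_, ?_⟩
            · rw [he']; exact List.mem_map.mpr ⟨p, by simp, rfl⟩
            · rw [he']
            · rw [he']; simpa using hlen3
        · obtain ⟨hn2, hnmem, hneq, hncond⟩ := hnew
          have hne : e.1 ≠ p.2 := ((hmem' e.1).mp hnmem).2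
          refine Or.inr ⟨hn2, ((hmem' e.1).mp hnmem).1, ?_, hncond⟩
          rw [hneq, hfilter' e.1 hne]
      · intro r hr2 hrmem hrcond
        by_cases hrp : r = p.2
        · -- the head rank itself: its entry was appended to acc
          refine ⟨(p.2, ((p :: rest0).filter (fun q => q.2 == p.2)).map (fun q => q.1)),
            ihc.2.2 _ (by simp), by rw [hrp]⟩
        · have hrmem' : r ∈ ((p :: rest0).filter (fun q => q.2 != p.2)).map (fun q => q.2) :=
            (hmem' r).mpr ⟨hrmem, hrp⟩
          have hrcond' : (((((p :: rest0).filter (fun q => q.2 != p.2)).filter (fun q => q.2 == r)).length : Int) + dl == 3) = true := by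
            rw [hfilter' r hrp]; exact_mod_cast hrcond
          obtain ⟨e, he, he1⟩ := ihc.2.1 r hr2 hrmem' (by exact_mod_cast hrcond')
          exact ⟨e, he, he1⟩
      · intro e he
        exact ihc.2.2 e (List.mem_append.mpr (Or.inl he))
    · -- condition false: acc' = acc
      rw [if_neg hcnd]
      rw [dif_neg hcnd] at ihc
      refine ⟨?_, ?_, ?_⟩
      · intro e he
        rcases (ihc.1 e he) with hacc | hnew
        · exact Or.inl hacc
        · obtain ⟨hn2, hnmem, hneq, hncond⟩ := hnew
          have hne : e.1 ≠ p.2 := ((hmem' e.1).mp hnmem).2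
          refine Or.inr ⟨hn2, ((hmem' e.1).mp hnmem).1, ?_, hncond⟩
          rw [hneq, hfilter' e.1 hne]
      · intro r hr2 hrmem hrcond
        by_cases hrp : r = p.2
        · -- the head rank fails the (false) condition: contradiction
          exfalso
          apply hcnd
          have h1 : (p.2 != 2) = true := by subst hrp; simpa using hr2
          have h2 : (((((p :: rest0).filter (fun q => q.2 == p.2)).map (fun q => q.1)).length : Int) + dl == 3) = true := by
            rw [List.length_map]
            subst hrp
            exact_mod_cast hrcond
          simp only [Bool.and_eq_true]
          exact ⟨h1, h2⟩
        · have hrmem' : r ∈ ((p :: rest0).filter (fun q => q.2 != p.2)).map (fun q => q.2) :=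
            (hmem' r).mpr ⟨hrmem, hrp⟩
          have hrcond' : (((((p :: rest0).filter (fun q => q.2 != p.2)).filter (fun q => q.2 == r)).length : Int) + dl == 3) = true := by
            rw [hfilter' r hrp]; exact_mod_cast hrcond
          obtain ⟨e, he, he1⟩ := ihc.2.1 r hr2 hrmem' (by exact_mod_cast hrcond')
          exact ⟨e, he, he1⟩
      · intro e he
        exact ihc.2.2 e he

-- cands for the sorted pairs, phrased over the original ranks
theorem pv_cands_spec (ranks : List Int) (dl : Int) :
    (∀ e ∈ pvRunsLoop dl [] (PySem.List.sorted (PySem.List.enumerate ranks) (fun p => p.2)),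
        e.1 ≠ 2 ∧ e.2 = pvIdxs ranks e.1 ∧ pvCond ranks dl e.1 = true)
    ∧ (∀ r : Int, r ≠ 2 → r ∈ ranks → pvCond ranks dl r = true →
        ∃ e ∈ pvRunsLoop dl [] (PySem.List.sorted (PySem.List.enumerate ranks) (fun p => p.2)), e.1 = r) := by
  have hpw : (PySem.List.sorted (PySem.List.enumerate ranks) (fun p : Int × Int => p.2)).Pairwise
      (fun a b => a.2 ≤ b.2) := PySem.List.sorted_pairwise _ _
  have H := pv_loop_spec dl (PySem.List.sorted (PySem.List.enumerate ranks) (fun p => p.2)) [] hpw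
  constructor
  · intro e he
    rcases H.1 e he with habs | ⟨h2, _, heq, hcond⟩
    · simp at habs
    · rw [pv_sorted_filter] at heq
      refine ⟨h2, heq, ?_⟩
      show ((((pvIdxs ranks e.1).length : Nat) : Int) + dl == 3) = true
      rw [show pvIdxs ranks e.1 = e.2 from heq.symm]
      exact hcond
  · intro r hr2 hrranks hrcond
    apply H.2.1 r hr2
    · have hmem : r ∈ (PySem.List.enumerate ranks 0).map (fun q => q.2) := by
        rw [PySem.List.map_snd_enumerate]; exact hrranks
      obtain ⟨q, hq, hq2⟩ := List.mem_map.mp hmem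
      exact List.mem_map.mpr ⟨q, (PySem.List.mem_sorted _ _ _ _).mpr hq, hq2⟩
    · rw [pv_sorted_filter]
      have : ((PySem.List.enumerate ranks 0).filter (fun q => q.2 == r)).length
          = (pvIdxs ranks r).length := by
        simp [pvIdxs]
      rw [this]
      exact hrcond

-- ---- the final scan ----
theorem pv_pick_spec (hand deuces : List Int) (ranksF : List Int) (dl : Int)
    (cands : List (Int × List Int))
    (h1 : ∀ e ∈ cands, e.1 ≠ 2 ∧ e.2 = pvIdxs ranksF e.1 ∧ pvCond ranksF dl e.1 = true)
    (h2 : ∀ r : Int, r ≠ 2 → r ∈ ranksF → pvCond ranksF dl r = true → ∃ e ∈ cands, e.1 = r) :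
    ∀ rs : List Int, (∀ x ∈ rs, x ∈ ranksF) →
    pvPick hand deuces cands rs =
      match (rs.filter (fun r => r != 2)).find? (pvCond ranksF dl) with
      | some k => some ((deuces ++ pvIdxs ranksF k).map (fun i => (PySem.List.pyGet? hand i).getD 0))
      | none => none := by
  intro rs
  induction rs with
  | nil => intro _; rfl
  | cons r rs ihr =>
    intro hsub
    rw [pvPick]
    by_cases hr2 : r = 2
    · have hnone : cands.find? (fun c => r == c.1) = none := by
        rw [List.find?_eq_none]
        intro c hc
        have hcne := (h1 c hc).1
        simp only [beq_iff_eq]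
        intro hrc
        exact hcne (hrc ▸ hr2.symm).symm
      have hfilter : (r :: rs).filter (fun x => x != 2) = rs.filter (fun x => x != 2) := by
        simp [hr2]
      rw [hnone, hfilter]
      exact ihr (fun x hx => hsub x (List.mem_cons_of_mem _ hx))
    · have hfilter : (r :: rs).filter (fun x => x != 2) = r :: rs.filter (fun x => x != 2) := by
        simp [hr2]
      rw [hfilter]
      by_cases hc : pvCond ranksF dl r = true
      · obtain ⟨e, he, he1⟩ := h2 r hr2 (hsub r (by simp)) hc
        have hisSome : (cands.find? (fun c => r == c.1)).isSome :=
          List.find?_isSome.mpr ⟨e, he, by simp [he1]⟩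
        cases hcfind : cands.find? (fun c => r == c.1) with
        | none => rw [hcfind] at hisSome; simp at hisSome
        | some c =>
          have hcmem := List.mem_of_find?_eq_some hcfind
          have hceq : c.1 = r := by
            have := List.find?_some hcfind
            simp at this
            exact this.symm
          have hrhs : (r :: rs.filter (fun x => x != 2)).find? (pvCond ranksF dl) = some r := by
            rw [List.find?_cons, hc]
          rw [hrhs]
          have hc2 := (h1 c hcmem).2.1
          show some (List.map (fun i => (PySem.List.pyGet? hand i).getD 0) (deuces ++ c.2))
              = some (List.map (fun i => (PySem.List.pyGet? hand i).getD 0) (deuces ++ pvIdxs ranksF r))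
          rw [hc2, hceq]
      · have hnone : cands.find? (fun c => r == c.1) = none := by
          rw [List.find?_eq_none]
          intro c hcmem
          simp only [beq_iff_eq]
          intro hrc
          apply hc
          rw [hrc]
          exact (h1 c hcmem).2.2
        have hrhs : (r :: rs.filter (fun x => x != 2)).find? (pvCond ranksF dl)
            = (rs.filter (fun x => x != 2)).find? (pvCond ranksF dl) := by
          rw [List.find?_cons]
          simp only [Bool.not_eq_true] at hc
          rw [hc]
        rw [hnone, hrhs]
        exact ihr (fun x hx => hsub x (List.mem_cons_of_mem _ hx))

-- ===== VERDICT (by name: the statement is the Claim_ definition above) =====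
theorem holds_3_of_a_kind_spec : Claim_equal_holds_3_of_a_kind := by
  intro ranks suits hand _ _
  simp only [Spec_holds_3_of_a_kind, holds_3_of_a_kind, holds_3_of_a_kind_alt]
  rw [pv_counts_items, List.find?_map, pv_find?_ofList, pv_sorted_filter]
  have hsub : ∀ x ∈ ranks, x ∈ ranks := fun x hx => hx
  rw [pv_pick_spec hand
        (((PySem.List.enumerate ranks).filter (fun p => p.2 == 2)).map (fun p => p.1)) ranks
        ((((PySem.List.enumerate ranks).filter (fun p => p.2 == 2)).map (fun p => p.1)).length : Int)
        (pvRunsLoop ((((PySem.List.enumerate ranks).filter (fun p => p.2 == 2)).map (fun p => p.1)).length : Int)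
          [] (PySem.List.sorted (PySem.List.enumerate ranks) (fun p => p.2)))
        (pv_cands_spec ranks _).1 (pv_cands_spec ranks _).2 ranks hsub]
  have hcongr := pv_find?_congr_mem (ranks.filter (fun r => r != 2))
      ((fun p => p.2 + ((((PySem.List.enumerate ranks).filter (fun p => p.2 == 2)).map (fun p => p.1)).length : Int) == 3)
        ∘ (fun k => (k, ((PySem.List.count (ranks.filter (fun r => r != 2)) k : Nat) : Int))))
      (pvCond ranks ((((PySem.List.enumerate ranks).filter (fun p => p.2 == 2)).map (fun p => p.1)).length : Int))
      (by
        intro k hk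
        have hk2 : k ≠ 2 := by simpa using (List.of_mem_filter hk)
        simp only [Function.comp, pvCond]
        rw [← pv_count_aux ranks k hk2])
  rw [hcongr]
  cases hf : (ranks.filter (fun r => r != 2)).find?
      (pvCond ranks ((((PySem.List.enumerate ranks).filter (fun p => p.2 == 2)).map (fun p => p.1)).length : Int)) with
  | none => rfl
  | some k => simp [pvGetCards, pvIdxs]
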